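-- pv_equiv track=rewrite | github.com/tsani/coding-cat-public | double-letter/mutation_3.py | double_letter
-- ===== SOURCE A (Python) =====
-- def double_letter(word):
--     '''
--         Change comparison logic, "if result not in consonants"
--         will cause the code to look at non-consonant characters instead
--     '''
--     consonants = "bcdfghjklpmntrqsvwxyzBCDFGHJKLMNPQRSTVWXYZ"
--     consonant_count = 0
--     result = list(word)
--
--     for i in range(len(result)):
--         if result[i] not in consonants: #Wrong comparison
--             consonant_count += 1
--             if consonant_count == 2:
--                 result[i] = result[i] * 2
--                 break
--     return "".join(result)
-- ===== SOURCE B (Python) =====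
-- def double_letter(word):
--     consonants = "bcdfghjklpmntrqsvwxyzBCDFGHJKLMNPQRSTVWXYZ"
--     positions = [i for i, c in enumerate(word) if c not in consonants]
--     if len(positions) < 2:
--         return word
--     idx = positions[1]
--     return word[:idx] + word[idx] * 2 + word[idx + 1:]
-- ===== Notes on version B (the rewrite author's own statement) =====
-- stated objective: simpler
-- what changed: Replaces the running consonant counter with early break and in-place list mutation by gathering all non-consonant positions once, indexing the second, and rebuilding via string slicing.
import Mathlib
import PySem

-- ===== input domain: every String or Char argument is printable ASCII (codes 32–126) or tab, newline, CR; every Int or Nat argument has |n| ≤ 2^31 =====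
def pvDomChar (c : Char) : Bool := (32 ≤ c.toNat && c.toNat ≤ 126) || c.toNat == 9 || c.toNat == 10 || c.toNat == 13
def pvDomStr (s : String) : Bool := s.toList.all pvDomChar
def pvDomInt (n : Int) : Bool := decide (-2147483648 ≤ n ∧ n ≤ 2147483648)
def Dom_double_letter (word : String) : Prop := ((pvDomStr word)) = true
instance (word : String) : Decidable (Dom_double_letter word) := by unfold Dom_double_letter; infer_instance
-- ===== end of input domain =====

-- B gathers all non-consonant positions once and rebuilds by slicing, instead of A's
-- running counter with early break and in-place list mutation (objective: simpler).

-- ===== PORT A =====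
-- the consonants string, as its character list
def pvConsonants : List Char := "bcdfghjklpmntrqsvwxyzBCDFGHJKLMNPQRSTVWXYZ".toList

-- A's for-loop with break over result = list(word); cells are the chars of each 1-char
-- string ("x in consonants" on a 1-char string is char membership; "".join = flatten,
-- both exact here).
def dlA_loop (count : Nat) : List Char → List (List Char)
  | [] => []
  | c :: rest =>
      if ¬ pvConsonants.contains c then
        if count + 1 = 2 then [c, c] :: rest.map (fun x => [x])
        else [c] :: dlA_loop (count + 1) rest
      else [c] :: dlA_loop count rest

def double_letter (word : String) : String :=
  String.ofList (dlA_loop 0 word.toList).flatten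

-- ===== PORT B =====
-- Source B: positions = [i for i, c in enumerate(word) if c not in consonants];
-- if fewer than two, return word, else double word[idx] via slices.
-- positions[1] and word[idx] are guarded in range in Source B, so pyGetD defaults never fire.
def double_letter_alt (word : String) : String :=
  let l := word.toList
  let positions := ((PySem.List.enumerate l 0).filter
      (fun p => !pvConsonants.contains p.2)).map (·.1)
  if positions.length < 2 then word
  else
    let idx := PySem.List.pyGetD positions 1 0
    let c := PySem.List.pyGetD l idx ' '
    String.ofList (PySem.List.slice l none (some idx) ++ [c, c] ++
      PySem.List.slice l (some (idx + 1)) none)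

-- ===== PRECONDITION & SPEC =====
def Spec_double_letter (word : String) (out : String) : Prop := out = double_letter_alt word
instance (word : String) (out : String) : Decidable (Spec_double_letter word out) := by unfold Spec_double_letter; infer_instance

-- ===== CLAIM (what is proved, stated in full; the proofs are below) =====
def Claim_equal_double_letter : Prop := ∀ (word : String), Dom_double_letter word → Spec_double_letter word (double_letter word)

-- ===== LEMMAS AND PROOFS =====

-- the non-consonant positions of l, enumerated from s
def pvPos (l : List Char) (s : Int) : List Int :=
  ((PySem.List.enumerate l s).filter (fun p => !pvConsonants.contains p.2)).map (·.1)

theorem pvPos_nil (s : Int) : pvPos [] s = [] := by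
  simp [pvPos, PySem.List.enumerate_nil]

theorem pvPos_cons (c : Char) (rest : List Char) (s : Int) :
    pvPos (c :: rest) s =
      if c ∈ pvConsonants then pvPos rest (s + 1) else s :: pvPos rest (s + 1) := by
  by_cases h : c ∈ pvConsonants <;>
    simp [pvPos, PySem.List.enumerate_cons, h]

theorem pvPos_ge (l : List Char) (s : Int) : ∀ i ∈ pvPos l s, s ≤ i := by
  intro i hi
  simp only [pvPos, List.mem_map, List.mem_filter] at hi
  obtain ⟨p, ⟨hp, _⟩, rfl⟩ := hi
  rw [PySem.List.mem_enumerate_iff] at hp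
  obtain ⟨k, _, rfl⟩ := hp
  simp

theorem pvFlatten_singleton (l : List Char) : (l.map (fun x => [x])).flatten = l := by
  induction l with
  | nil => simp
  | cons a t ih => simp [ih]

theorem dlA_loop_flatten (l : List Char) : ∀ (count : Nat) (s : Int), count ≤ 1 →
    (dlA_loop count l).flatten =
      match (pvPos l s)[1 - count]? with
      | none => l
      | some i =>
          let n := (i - s).toNat
          l.take n ++ [l.getD n ' ', l.getD n ' '] ++ l.drop (n + 1) := by
  induction l with
  | nil => intro count s _; simp [dlA_loop, pvPos_nil]
  | cons c rest ih =>
    intro count s hcount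
    by_cases hc : c ∈ pvConsonants
    · -- consonant: keep the cell, count unchanged
      rw [pvPos_cons, if_pos hc]
      have hA : dlA_loop count (c :: rest) = [c] :: dlA_loop count rest := by
        simp [dlA_loop, hc]
      rw [hA, List.flatten_cons, ih count (s + 1) hcount]
      cases hget : (pvPos rest (s + 1))[1 - count]? with
      | none => simp
      | some i =>
        have hi : s + 1 ≤ i := pvPos_ge rest (s + 1) i (List.mem_of_getElem? hget)
        have h1 : (i - s).toNat = (i - (s + 1)).toNat + 1 := by omega
        simp [h1, List.getD]
    · -- non-consonant
      interval_cases count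
      · -- count = 0: recurse with count = 1; index 1 of (s :: tail) is tail's index 0
        rw [pvPos_cons, if_neg hc]
        have hA : dlA_loop 0 (c :: rest) = [c] :: dlA_loop 1 rest := by
          simp [dlA_loop, hc]
        rw [hA, List.flatten_cons, ih 1 (s + 1) le_rfl]
        simp only [Nat.sub_self, Nat.sub_zero]
        have hidx : (s :: pvPos rest (s + 1))[(1 : Nat)]? = (pvPos rest (s + 1))[(0 : Nat)]? := by
          simp
        rw [hidx]
        cases hget : (pvPos rest (s + 1))[(0 : Nat)]? with
        | none => simp
        | some i =>
          have hi : s + 1 ≤ i := pvPos_ge rest (s + 1) i (List.mem_of_getElem? hget)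
          have h1 : (i - s).toNat = (i - (s + 1)).toNat + 1 := by omega
          simp [h1, List.getD]
      · -- count = 1: double this cell and stop
        rw [pvPos_cons, if_neg hc]
        have hA : dlA_loop 1 (c :: rest) = [c, c] :: rest.map (fun x => [x]) := by
          simp [dlA_loop, hc]
        simp only [Nat.sub_self]
        have hidx : (s :: pvPos rest (s + 1))[(0 : Nat)]? = some s := by simp
        rw [hA, hidx]
        simp [List.getD, pvFlatten_singleton]

-- ===== VERDICT (by name: the statement is the Claim_ definition above) =====
theorem double_letter_spec : Claim_equal_double_letter := by
  unfold Claim_equal_double_letter Spec_double_letter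
  intro word _
  unfold double_letter double_letter_alt
  have hloop := dlA_loop_flatten word.toList 0 0 (by omega)
  show String.ofList (dlA_loop 0 word.toList).flatten = _
  rw [hloop]
  set l := word.toList with hl
  have hpos : ((PySem.List.enumerate l 0).filter
      (fun p => !pvConsonants.contains p.2)).map (·.1) = pvPos l 0 := rfl
  simp only [hpos]
  by_cases hlen : (pvPos l 0).length < 2
  · have : (pvPos l 0)[1 - 0]? = none := by
      simp only [Nat.sub_zero]
      exact List.getElem?_eq_none (by omega)
    rw [this, if_pos hlen]
    exact (String.ofList_toList).symm ▸ rfl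
  · have h1 : 1 < (pvPos l 0).length := by omega
    have hget : (pvPos l 0)[1 - 0]? = some ((pvPos l 0)[1]'h1) := by
      simp
    rw [hget, if_neg hlen]
    have hi0 : (0 : Int) ≤ (pvPos l 0)[1]'h1 :=
      pvPos_ge l 0 _ (List.getElem_mem h1)
    have hidx : PySem.List.pyGetD (pvPos l 0) 1 0 = (pvPos l 0)[1]'h1 := by
      rw [PySem.List.pyGetD_of_nonneg _ _ (by norm_num)]
      simp [List.getElem?_eq_getElem h1]
    rw [hidx]
    set i := (pvPos l 0)[1]'h1 with hidef
    have hslice1 : PySem.List.slice l none (some i) = l.take i.toNat :=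
      PySem.List.slice_to l hi0
    have hslice2 : PySem.List.slice l (some (i + 1)) none = l.drop (i + 1).toNat :=
      PySem.List.slice_from l (by omega)
    have hchar : PySem.List.pyGetD l i ' ' = l.getD i.toNat ' ' := by
      rw [PySem.List.pyGetD_of_nonneg _ _ hi0]
    rw [hslice1, hslice2, hchar]
    have : (i + 1).toNat = i.toNat + 1 := by omega
    rw [this]
    simp
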